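-- pv_equiv track=rewrite | github.com/fmelipin/OSEP-Preparation-Notes | VBA Macros/XOR_encoder.py | format_for_vba
-- ===== SOURCE A (Python) =====
-- def format_for_vba(encoded_shellcode):
--     vba_array = "buf = Array("
--     for i, byte in enumerate(encoded_shellcode):
--         vba_array += f"{byte}, "
--         if (i + 1) % 50 == 0:
--             vba_array += "_\n"
--     vba_array = vba_array.rstrip(", ") + ")"
--     return vba_array
-- ===== SOURCE B (Python) =====
-- def format_for_vba(encoded_shellcode):
--     parts = ["buf = Array("]
--     for start in range(0, len(encoded_shellcode), 50):
--         chunk = encoded_shellcode[start:start + 50]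
--         parts.append("".join(f"{b}, " for b in chunk))
--         if len(chunk) == 50:
--             parts.append("_\n")
--     return "".join(parts).rstrip(", ") + ")"
-- ===== Notes on version B (the rewrite author's own statement) =====
-- stated objective: alternative
-- what changed: Replaces A's single enumerate loop with a modulo-50 counter by a recursion over 50-byte chunks (take/drop), rendering each chunk with a join and appending the '_\n' continuation marker per full chunk.
import Mathlib
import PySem

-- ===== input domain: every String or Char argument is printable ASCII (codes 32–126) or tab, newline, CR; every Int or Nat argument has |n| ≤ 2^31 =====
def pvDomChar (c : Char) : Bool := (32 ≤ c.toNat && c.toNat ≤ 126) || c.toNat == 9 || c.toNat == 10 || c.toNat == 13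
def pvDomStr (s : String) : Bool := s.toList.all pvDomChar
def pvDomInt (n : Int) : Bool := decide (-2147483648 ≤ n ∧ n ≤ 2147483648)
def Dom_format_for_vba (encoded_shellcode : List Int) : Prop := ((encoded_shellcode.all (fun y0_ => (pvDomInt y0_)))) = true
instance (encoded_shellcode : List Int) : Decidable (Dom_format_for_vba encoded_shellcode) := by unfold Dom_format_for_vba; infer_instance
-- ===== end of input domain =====

-- B re-decomposes A's per-byte enumerate loop (modulo-50 counter) as a loop over 50-byte chunks collecting parts for one final join; same output.

-- shared primitive: Python's s.rstrip(", ") — drop trailing characters from the set {',', ' '} (exact)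
def pyRstripCommaSpace (s : String) : String :=
  String.ofList ((s.toList.reverse.dropWhile (fun c => c == ',' || c == ' ')).reverse)

-- ===== PORT A =====
def format_for_vba (encoded_shellcode : List Int) : String :=
  let vba_array :=
    (PySem.List.enumerate encoded_shellcode).foldl
      (fun acc (p : Int × Int) =>
        let acc := acc ++ PySem.Int.toStr p.2 ++ ", "
        if PySem.Int.mod (p.1 + 1) 50 == 0 then acc ++ "_\n" else acc)
      "buf = Array("
  pyRstripCommaSpace vba_array ++ ")"

-- ===== PORT B =====
def format_for_vba_alt (encoded_shellcode : List Int) : String :=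
  let parts :=
    (PySem.List.pyRange 0 (encoded_shellcode.length : Int) 50).foldl
      (fun parts start =>
        let chunk := PySem.List.slice encoded_shellcode (some start) (some (start + 50))
        let parts := parts ++ [String.join (chunk.map (fun b => PySem.Int.toStr b ++ ", "))]
        if chunk.length == 50 then parts ++ ["_\n"] else parts)
      ["buf = Array("]
  pyRstripCommaSpace (String.join parts) ++ ")"

-- ===== PRECONDITION & SPEC =====
def Spec_format_for_vba (encoded_shellcode : List Int) (out : String) : Prop := out = format_for_vba_alt encoded_shellcode
instance (encoded_shellcode : List Int) (out : String) : Decidable (Spec_format_for_vba encoded_shellcode out) := by unfold Spec_format_for_vba; infer_instance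

-- ===== CLAIM (what is proved, stated in full; the proofs are below) =====
def Claim_equal_format_for_vba : Prop := ∀ (encoded_shellcode : List Int), Dom_format_for_vba encoded_shellcode → Spec_format_for_vba encoded_shellcode (format_for_vba encoded_shellcode)

-- ===== LEMMAS AND PROOFS =====

theorem strFoldl_acc (l : List String) : ∀ (a : String), l.foldl (fun r s => r ++ s) a = a ++ l.foldl (fun r s => r ++ s) "" := by
  induction l with
  | nil => intro a; simp [List.foldl]
  | cons h t ih => intro a; simp only [List.foldl_cons]; rw [ih (a ++ h), ih ("" ++ h), String.empty_append, String.append_assoc]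

theorem strJoin_cons (s : String) (l : List String) : String.join (s :: l) = s ++ String.join l := by
  simp only [String.join, List.foldl_cons, String.empty_append]; exact strFoldl_acc l s

theorem strJoin_snoc (l : List String) (s : String) : String.join (l ++ [s]) = String.join l ++ s := by
  induction l with
  | nil => simp [String.join, List.foldl, String.empty_append]
  | cons h t ih => rw [List.cons_append, strJoin_cons, strJoin_cons, ih, String.append_assoc]

-- one chunk of B's output: the joined entries, plus the continuation marker on a full chunk
def vbaChunkLine (head : List Int) : String :=
  let line := String.join (head.map (fun b => PySem.Int.toStr b ++ ", "))
  if head.length == 50 then line ++ "_\n" else line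

-- B's loop, re-expressed as a recursion over 50-byte chunks (proof-side bridge)
def vbaBody : List Int → String
  | [] => ""
  | b :: t => vbaChunkLine ((b :: t).take 50) ++ vbaBody ((b :: t).drop 50)
termination_by l => l.length
decreasing_by simp [List.length_drop]

-- A's loop, restarted at index i with an empty accumulator
def vbaF : List Int → Int → String
  | [], _ => ""
  | b :: t, i =>
      PySem.Int.toStr b ++ ", " ++ (if PySem.Int.mod (i + 1) 50 == 0 then "_\n" else "") ++ vbaF t (i + 1)

theorem vbaF_fold (l : List Int) : ∀ (i : Int) (acc : String),
    (PySem.List.enumerate l i).foldl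
      (fun acc (p : Int × Int) =>
        let acc := acc ++ PySem.Int.toStr p.2 ++ ", "
        if PySem.Int.mod (p.1 + 1) 50 == 0 then acc ++ "_\n" else acc)
      acc = acc ++ vbaF l i := by
  induction l with
  | nil => intro i acc; simp [PySem.List.enumerate, vbaF]
  | cons b t ih =>
      intro i acc
      rw [PySem.List.enumerate_cons]
      simp only [List.foldl_cons, ih, vbaF]
      split_ifs with h <;> simp [String.append_assoc, String.append_empty]

theorem vbaF_shift (l : List Int) : ∀ (i : Int), vbaF l (i + 50) = vbaF l i := by
  induction l with
  | nil => intro i; rfl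
  | cons b t ih =>
      intro i
      have hm : PySem.Int.mod (i + 50 + 1) 50 = PySem.Int.mod (i + 1) 50 := by
        unfold PySem.Int.mod
        rw [Int.fmod_eq_emod, Int.fmod_eq_emod]; simp; omega
      have h : i + 50 + 1 = i + 1 + 50 := by ring
      simp only [vbaF, hm]
      rw [h, ih]

def vbaChunkStr (m : List Int) : String := String.join (m.map (fun b => PySem.Int.toStr b ++ ", "))

theorem vbaF_chunk (l : List Int) : ∀ (k : Nat), 1 ≤ k → k ≤ 50 →
    vbaF l ((50 : Int) - k) =
      vbaChunkStr (l.take k) ++ (if k ≤ l.length then "_\n" ++ vbaF (l.drop k) 0 else "") := by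
  induction l with
  | nil =>
      intro k h1 _
      simp only [vbaF, List.take_nil, List.length_nil, vbaChunkStr, List.map_nil]
      rw [if_neg (by omega)]
      rfl
  | cons b t ih =>
      intro k h1 h2
      by_cases hk : k = 1
      · subst hk
        have hmb : (PySem.Int.mod ((50 : Int) - (1 : Nat) + 1) 50 == 0) = true := by decide
        have h50 : vbaF t ((50 : Int) - (1 : Nat) + 1) = vbaF t 0 := by
          have h := vbaF_shift t 0
          norm_num at h ⊢
          exact h
        simp only [vbaF, hmb, if_true]
        rw [h50]
        simp [vbaChunkStr, String.join, String.append_assoc, String.empty_append]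
        rw [← String.append_assoc]
        congr 1
      · have hmb : (PySem.Int.mod ((50 : Int) - (k : Nat) + 1) 50 == 0) = false := by
          unfold PySem.Int.mod
          rw [Int.fmod_eq_emod]; simp; omega
        have hstep : (50 : Int) - k + 1 = (50 : Int) - (k - 1 : Nat) := by
          omega
        have iht := ih (k - 1) (by omega) (by omega)
        have htake : (b :: t).take k = b :: t.take (k - 1) := by
          cases k with
          | zero => omega
          | succ n => simp
        have hdrop : (b :: t).drop k = t.drop (k - 1) := by
          cases k with
          | zero => omega
          | succ n => simp
        have hlen : (k ≤ (b :: t).length) = (k - 1 ≤ t.length) := by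
          simp only [List.length_cons, eq_iff_iff]; omega
        simp only [vbaF]
        rw [hmb]
        simp only [Bool.false_eq_true, if_false]
        rw [hstep, iht, htake, hdrop]
        simp only [hlen, vbaChunkStr, List.map_cons, strJoin_cons]
        simp [String.append_assoc]

theorem vbaF_eq_body (l : List Int) : vbaF l 0 = vbaBody l := by
  induction l using vbaBody.induct with
  | case1 => simp [vbaF, vbaBody]
  | case2 b t ih =>
      have h0 : (0 : Int) = (50 : Int) - (50 : Nat) := by norm_num
      rw [h0, vbaF_chunk (b :: t) 50 (by norm_num) (le_refl 50), vbaBody]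
      by_cases h : 50 ≤ (b :: t).length
      · have h' : 50 ≤ t.length + 1 := by simpa using h
        have hl : ((b :: t).take 50).length = 50 := by
          simp only [List.length_take, List.length_cons]
          omega
        rw [if_pos h, ih]
        simp only [vbaChunkLine]
        rw [hl]
        simp [String.append_assoc, vbaChunkStr, List.map_take]
      · have h' : ¬ 50 ≤ t.length + 1 := by simpa using h
        have hdrop : (b :: t).drop 50 = [] := by
          rw [List.drop_eq_nil_iff]
          simp only [List.length_cons]
          omega
        have hl : ((b :: t).take 50).length ≠ 50 := by
          simp only [List.length_take, List.length_cons]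
          omega
        rw [if_neg h, hdrop]
        simp only [vbaChunkLine, vbaBody]
        rw [if_neg (by simpa using hl)]
        simp [String.append_empty, vbaChunkStr, List.map_take]

-- pyRange with step 50: induction forms
theorem pyRange50_nil (a b : Int) (h : b ≤ a) : PySem.List.pyRange a b 50 = [] := by
  rw [PySem.List.pyRange_of_pos a b (by norm_num)]
  rw [if_neg (by omega)]
  simp

theorem pyRange50_cons (a b : Int) (h : a < b) :
    PySem.List.pyRange a b 50 = a :: PySem.List.pyRange (a + 50) b 50 := by
  rw [PySem.List.pyRange_of_pos a b (by norm_num), PySem.List.pyRange_of_pos (a + 50) b (by norm_num)]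
  rw [if_pos h]
  by_cases h2 : a + 50 < b
  · rw [if_pos h2]
    have hcnt : ((b - a + 50 - 1) / 50).toNat = ((b - (a + 50) + 50 - 1) / 50).toNat + 1 := by
      omega
    rw [hcnt, List.range_succ_eq_map]
    simp only [List.map_cons, List.map_map, Nat.cast_zero, mul_zero, add_zero]
    congr 1
    congr 1
    funext k
    simp only [Function.comp]
    push_cast
    ring
  · rw [if_neg h2]
    have hcnt : ((b - a + 50 - 1) / 50).toNat = 1 := by omega
    rw [hcnt]
    simp

-- B's parts loop, started at offset s, appends exactly the chunk rendering of l.drop s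
theorem vbaParts_loop (l : List Int) : ∀ (n s : Nat) (acc : List String), l.length - s = n →
    String.join ((PySem.List.pyRange (s : Int) (l.length : Int) 50).foldl
      (fun parts start =>
        let chunk := PySem.List.slice l (some start) (some (start + 50))
        let parts := parts ++ [String.join (chunk.map (fun b => PySem.Int.toStr b ++ ", "))]
        if chunk.length == 50 then parts ++ ["_\n"] else parts)
      acc) = String.join acc ++ vbaBody (l.drop s) := by
  intro n
  induction n using Nat.strong_induction_on with
  | _ n ihn =>
      intro s acc hn
      by_cases hs : l.length ≤ s
      · rw [pyRange50_nil _ _ (by exact_mod_cast hs)]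
        rw [List.drop_eq_nil_iff.mpr hs]
        simp [vbaBody, List.foldl, String.append_empty]
      · have hs' : (s : Int) < (l.length : Int) := by
          omega
        rw [pyRange50_cons _ _ hs', List.foldl_cons]
        have hcast : (s : Int) + 50 = ((s + 50 : Nat) : Int) := by push_cast; ring
        rw [hcast]
        rw [ihn (l.length - (s + 50)) (by omega) (s + 50) _ rfl]
        have hslice : PySem.List.slice l (some (s : Int)) (some ((s + 50 : Nat) : Int)) = (l.drop s).take 50 := by
          rw [← hcast]
          have h := PySem.List.slice_natCast_add l s 50
          simpa using h
        simp only [hslice]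
        have hne : l.drop s ≠ [] := by
          intro hnil
          have := congrArg List.length hnil
          simp [List.length_drop] at this
          omega
        obtain ⟨b, t, hbt⟩ := List.exists_cons_of_ne_nil hne
        have hbody : vbaBody (l.drop s) =
            vbaChunkLine ((l.drop s).take 50) ++ vbaBody (l.drop (s + 50)) := by
          rw [← List.drop_drop, hbt, vbaBody, ← hbt]
        rw [hbody]
        by_cases hc : ((l.drop s).take 50).length = 50
        · have hcb : (((l.drop s).take 50).length == 50) = true := by simp [hc]
          rw [if_pos hcb]
          rw [strJoin_snoc, strJoin_snoc]
          simp only [vbaChunkLine]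
          rw [hc]
          simp [String.append_assoc]
        · have hcb : (((l.drop s).take 50).length == 50) = false := by
            rw [beq_eq_false_iff_ne]; exact hc
          rw [if_neg (by rw [hcb]; simp)]
          rw [strJoin_snoc]
          simp only [vbaChunkLine]
          rw [if_neg (by rw [hcb]; simp)]
          simp [String.append_assoc]

-- ===== VERDICT (by name: the statement is the Claim_ definition above) =====
theorem format_for_vba_spec : Claim_equal_format_for_vba := by
  intro l _
  unfold Spec_format_for_vba format_for_vba format_for_vba_alt
  have hp := vbaParts_loop l l.length 0 ["buf = Array("] rfl
  simp only [Nat.cast_zero, List.drop_zero] at hp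
  simp only [vbaF_fold l 0 "buf = Array(", hp, vbaF_eq_body]
  rw [strJoin_cons]
  simp [String.join, String.append_empty]
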